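-- pv_equiv track=rewrite | github.com/kale-male/HH-tasks | HH dynsearch.py | search
-- ===== SOURCE A (Python) =====
-- def search (n, m):
--     k = 0
--     s = {m}
--     seen = {m}
--     while n not in s:
--         k += 1
--         temp = set()
--         for i in s:
--             nums = [i - 1, i - 2]
--             if i%2 == 0:
--                 nums.append(i//2)
--             for j in nums:
--                 if j >= n and j not in seen:
--                     temp.add(j)
--         s = temp
--         seen |= temp
--     return k
-- ===== SOURCE B (Python) =====
-- def search(n, m):
--     # minimal number of -1 / -2 / (even) //2 steps from v down to n,
--     # halving as early as parity allows; O(log(m-n)) recursion depth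
--     def f(v):
--         d = v - n
--         if d <= 2 or v <= 0:
--             return (d + 1) // 2
--         best = (d + 1) // 2
--         if v % 2 == 0:
--             if v // 2 >= n:
--                 best = min(best, 1 + f(v // 2))
--         else:
--             if (v - 1) // 2 >= n:
--                 best = min(best, 2 + f((v - 1) // 2))
--         return best
--     return f(m)
-- ===== Notes on version B (the rewrite author's own statement) =====
-- stated objective: faster
-- what changed: A runs a breadth-first search level by level over the whole interval [n, m] with frontier/seen sets; B computes the same minimum step count by a logarithmic-depth greedy recursion that halves as early as parity allows and otherwise uses the closed form ceil((v-n)/2). Intended as asymptotically faster; measured: A times out at sizes where B returns instantly (one probe run measured B 270x faster at the largest size both finished, another could not get a clean ratio).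
import Mathlib
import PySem

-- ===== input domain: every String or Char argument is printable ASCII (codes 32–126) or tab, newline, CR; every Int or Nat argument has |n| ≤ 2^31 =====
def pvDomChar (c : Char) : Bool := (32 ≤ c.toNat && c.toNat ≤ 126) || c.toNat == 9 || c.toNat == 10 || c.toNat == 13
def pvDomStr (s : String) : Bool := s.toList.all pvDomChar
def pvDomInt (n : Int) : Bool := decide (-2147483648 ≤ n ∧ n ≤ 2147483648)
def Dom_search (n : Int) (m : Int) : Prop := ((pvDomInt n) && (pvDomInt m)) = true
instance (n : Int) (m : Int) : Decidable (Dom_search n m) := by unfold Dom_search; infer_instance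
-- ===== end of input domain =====

-- B replaces A's level-by-level BFS over [n, m] with a logarithmic-depth greedy recursion
-- (halve as early as parity allows, otherwise the closed form ceil((v-n)/2)); intended as faster:
-- a timing run saw A time out at sizes where B returns instantly.


-- ===== PORT A =====
-- nums = [i - 1, i - 2] (+ [i // 2] if i is even)
def searchNums (i : Int) : List Int :=
  if PySem.Int.mod i 2 = 0 then [i - 1, i - 2, PySem.Int.floordiv i 2] else [i - 1, i - 2]

-- one body of the while loop: build temp from the frontier s and the seen set.
-- seen is consumed by Python only through membership tests and insertions, so the
-- port keeps it as a hash set (exact for those operations); temp/s stay PySem.Sets.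
def searchStep (n : Int) (s : PySem.Set Int) (seen : Std.HashSet Int) : PySem.Set Int :=
  s.foldl (fun temp i =>
    (searchNums i).foldl (fun temp j =>
      if n ≤ j ∧ seen.contains j = false then PySem.Set.add temp j else temp) temp)
    PySem.Set.empty

-- the while loop; fuel only bounds the number of iterations (A's loop terminates
-- whenever n ≤ m, and search passes enough fuel for every such input)
def searchLoop (n : Int) (fuel : Nat) (k : Int) (s : PySem.Set Int) (seen : Std.HashSet Int) : Int :=
  match fuel with
  | 0 => k
  | fuel + 1 =>
    if PySem.Set.contains s n then k
    else
      let temp := searchStep n s seen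
      searchLoop n fuel (k + 1) temp (temp.foldl (fun h x => h.insert x) seen)  -- seen |= temp

def search (n : Int) (m : Int) : Int :=
  searchLoop n ((m - n).toNat + 1) 0 (PySem.Set.ofList [m]) ((∅ : Std.HashSet Int).insert m)

-- ===== PORT B =====
-- min steps from v down to n: closed form ceil((v-n)/2) near the base / for v ≤ 0,
-- otherwise also try halving as early as parity allows
def altF (n : Int) (v : Int) : Int :=
  let d := v - n
  if d ≤ 2 ∨ v ≤ 0 then PySem.Int.floordiv (d + 1) 2
  else
    let best := PySem.Int.floordiv (d + 1) 2
    if PySem.Int.mod v 2 = 0 then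
      if n ≤ PySem.Int.floordiv v 2 then min best (1 + altF n (PySem.Int.floordiv v 2)) else best
    else
      if n ≤ PySem.Int.floordiv (v - 1) 2 then min best (2 + altF n (PySem.Int.floordiv (v - 1) 2)) else best
termination_by v.toNat
decreasing_by
  all_goals
    rw [PySem.Int.floordiv_eq_ediv_of_pos (by omega)]
    omega

def search_alt (n : Int) (m : Int) : Int := altF n m

-- ===== PRECONDITION & SPEC =====
-- Pre_ excludes exactly n > m, where A's while loop never returns (the frontier
-- empties — every move stays below m < n — and the loop spins forever).
def Pre_search (n : Int) (m : Int) : Prop := n ≤ m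
instance (n : Int) (m : Int) : Decidable (Pre_search n m) := by unfold Pre_search; infer_instance
def pvWitness_search : Int × Int := (3, 10)

def Spec_search (n : Int) (m : Int) (out : Int) : Prop := out = search_alt n m
instance (n : Int) (m : Int) (out : Int) : Decidable (Spec_search n m out) := by unfold Spec_search; infer_instance

-- ===== CLAIM (what is proved, stated in full; the proofs are below) =====
def Claim_equal_search : Prop := ∀ (n : Int) (m : Int), Dom_search n m → Pre_search n m → Spec_search n m (search n m)

-- ===== LEMMAS AND PROOFS =====

-- the pruned step relation of A's BFS: j reachable from i in one move, kept only if j ≥ n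
theorem altF_unfold (n v : Int) : altF n v =
    if v - n ≤ 2 ∨ v ≤ 0 then (v - n + 1) / 2
    else if v % 2 = 0 then
      if n ≤ v / 2 then min ((v - n + 1) / 2) (1 + altF n (v / 2)) else (v - n + 1) / 2
    else
      if n ≤ (v - 1) / 2 then min ((v - n + 1) / 2) (2 + altF n ((v - 1) / 2)) else (v - n + 1) / 2 := by
  rw [altF]
  simp only [PySem.Int.floordiv_eq_ediv_of_pos (show (0:Int) < 2 by omega),
    PySem.Int.mod_eq_emod_of_pos (show (0:Int) < 2 by omega)]

theorem altF_nonneg (n v : Int) (h : n ≤ v) : 0 ≤ altF n v := by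
  rw [altF_unfold]
  split_ifs with h1 h2 h3 h4
  · omega
  · have := altF_nonneg n (v / 2) h3
    omega
  · omega
  · have := altF_nonneg n ((v - 1) / 2) h4
    omega
  · omega
termination_by v.toNat
decreasing_by all_goals omega

theorem altF_le_c (n v : Int) : altF n v ≤ (v - n + 1) / 2 := by
  rw [altF_unfold]
  split_ifs <;> omega

theorem altF_self (n : Int) : altF n n = 0 := by
  rw [altF_unfold]
  norm_num

theorem altF_pos (n v : Int) (h : n < v) : 1 ≤ altF n v := by
  rw [altF_unfold]
  split_ifs with h1 h2 h3 h4
  · omega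
  · have := altF_nonneg n (v / 2) h3
    omega
  · omega
  · have := altF_nonneg n ((v - 1) / 2) h4
    omega
  · omega

theorem altF_le_sub1 (n v : Int) (_h : n ≤ v - 1) : altF n v ≤ altF n (v - 1) + 1 := by
  have hc := altF_le_c n v
  rw [altF_unfold n (v - 1)]
  split_ifs with h1 h2 h3 h4
  · omega
  · -- v - 1 even (so v odd), guard n ≤ (v-1-?)… note (v-1-1)/2 here is (v-2)/2
    -- altF (v-1) = min ((v-1-n+1)/2) (1 + altF ((v-1)/2))
    have hv : altF n v = min ((v - n + 1) / 2) (2 + altF n ((v - 1) / 2)) := by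
      rw [altF_unfold n v, if_neg (by omega), if_neg (by omega), if_pos (by omega)]
    omega
  · omega
  · -- v - 1 odd (so v even), guard n ≤ (v-2)/2
    have hv : altF n v = min ((v - n + 1) / 2) (1 + altF n (v / 2)) := by
      rw [altF_unfold n v, if_neg (by omega), if_pos (by omega), if_pos (by omega)]
    have h6 := altF_le_sub1 n (v / 2) (by omega)
    have h7 : v / 2 - 1 = (v - 1 - 1) / 2 := by omega
    rw [h7] at h6
    omega
  · omega
termination_by v.toNat
decreasing_by omega

theorem altF_le_sub2 (n v : Int) (_h : n ≤ v - 2) : altF n v ≤ altF n (v - 2) + 1 := by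
  have hc := altF_le_c n v
  rw [altF_unfold n (v - 2)]
  split_ifs with h1 h2 h3 h4
  · omega
  · -- v - 2 even (v even), guard n ≤ (v-2)/2
    have hv : altF n v = min ((v - n + 1) / 2) (1 + altF n (v / 2)) := by
      rw [altF_unfold n v, if_neg (by omega), if_pos (by omega), if_pos (by omega)]
    have h6 := altF_le_sub1 n (v / 2) (by omega)
    have h7 : v / 2 - 1 = (v - 2) / 2 := by omega
    rw [h7] at h6
    omega
  · omega
  · -- v - 2 odd (v odd), guard n ≤ (v-3)/2
    have hv : altF n v = min ((v - n + 1) / 2) (2 + altF n ((v - 1) / 2)) := by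
      rw [altF_unfold n v, if_neg (by omega), if_neg (by omega), if_pos (by omega)]
    have h6 := altF_le_sub1 n ((v - 1) / 2) (by omega)
    have h7 : (v - 1) / 2 - 1 = (v - 2 - 1) / 2 := by omega
    rw [h7] at h6
    omega
  · omega

theorem altF_le_half (n v : Int) (hv : n ≤ v) (he : v % 2 = 0) (hh : n ≤ v / 2) :
    altF n v ≤ altF n (v / 2) + 1 := by
  by_cases hb : v - n ≤ 2 ∨ v ≤ 0
  · rcases hb with hb | hb
    · have h0 := altF_nonneg n (v / 2) hh
      rw [altF_unfold n v, if_pos (Or.inl hb)]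
      omega
    · have hhalf : altF n (v / 2) = (v / 2 - n + 1) / 2 := by
        rw [altF_unfold n (v / 2), if_pos (Or.inr (by omega))]
      rw [altF_unfold n v, if_pos (Or.inr hb), hhalf]
      omega
  · rw [altF_unfold n v, if_neg hb, if_pos he, if_pos hh]
    omega

def Edge (n i j : Int) : Prop := n ≤ j ∧ j ∈ searchNums i

inductive Reach (n m : Int) : Nat → Int → Prop
  | zero : Reach n m 0 m
  | step {k i j} : Reach n m k i → Edge n i j → Reach n m (k + 1) j

theorem searchNums_eq (i : Int) :
    searchNums i = if i % 2 = 0 then [i - 1, i - 2, i / 2] else [i - 1, i - 2] := by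
  rw [searchNums, PySem.Int.mod_eq_emod_of_pos (show (0:Int) < 2 by omega),
    PySem.Int.floordiv_eq_ediv_of_pos (show (0:Int) < 2 by omega)]

theorem edge_sub1 (n v : Int) (h : n ≤ v - 1) : Edge n v (v - 1) := by
  refine ⟨h, ?_⟩
  rw [searchNums_eq]
  split_ifs <;> simp

theorem edge_sub2 (n v : Int) (h : n ≤ v - 2) : Edge n v (v - 2) := by
  refine ⟨h, ?_⟩
  rw [searchNums_eq]
  split_ifs <;> simp

theorem edge_half (n v : Int) (he : v % 2 = 0) (h : n ≤ v / 2) : Edge n v (v / 2) := by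
  refine ⟨h, ?_⟩
  rw [searchNums_eq, if_pos he]
  simp

theorem altF_le_edge (n v j : Int) (hv : n ≤ v) (he : Edge n v j) : altF n v ≤ altF n j + 1 := by
  obtain ⟨hj, hmem⟩ := he
  rw [searchNums_eq] at hmem
  by_cases h2 : v % 2 = 0
  · rw [if_pos h2] at hmem
    simp only [List.mem_cons, List.not_mem_nil, or_false] at hmem
    rcases hmem with rfl | rfl | rfl
    · exact altF_le_sub1 n v hj
    · exact altF_le_sub2 n v hj
    · exact altF_le_half n v hv h2 hj
  · rw [if_neg h2] at hmem
    simp only [List.mem_cons, List.not_mem_nil, or_false] at hmem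
    rcases hmem with rfl | rfl
    · exact altF_le_sub1 n v hj
    · exact altF_le_sub2 n v hj

theorem reach_ge (n m : Int) (hnm : n ≤ m) {k : Nat} {v : Int} (h : Reach n m k v) : n ≤ v := by
  induction h with
  | zero => exact hnm
  | step _ he _ => exact he.1

theorem altF_le_reach (n m : Int) (hnm : n ≤ m) {k : Nat} {v : Int} (h : Reach n m k v) :
    altF n m ≤ (k : Int) + altF n v := by
  induction h with
  | zero => simp
  | step hr he ih =>
    have hi := reach_ge n m hnm hr
    have := altF_le_edge n _ _ hi he
    push_cast
    omega

theorem reach_cons (n v j : Int) {k : Nat} {x : Int} (he : Edge n v j) (h : Reach n j k x) :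
    Reach n v (k + 1) x := by
  induction h with
  | zero => exact Reach.step Reach.zero he
  | step _ he' ih => exact Reach.step ih he'

theorem reach_sub_ones (n m : Int) (t : Nat) (h : (t : Int) ≤ m - n) : Reach n m t (m - t) := by
  induction t with
  | zero => simpa using Reach.zero
  | succ t ih =>
    have h1 : (t : Int) ≤ m - n := by push_cast at h ⊢; omega
    have he : Edge n (m - t) (m - t - 1) := edge_sub1 n (m - t) (by push_cast at h; omega)
    have := Reach.step (ih h1) he
    have heq : m - ((t : Int) + 1) = m - t - 1 := by omega
    push_cast
    rw [heq]
    exact this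

theorem reach_exists (n v : Int) (h : n ≤ v) :
    ∃ K : Nat, (K : Int) ≤ altF n v ∧ Reach n v K n := by
  by_cases hvn : v = n
  · subst hvn
    exact ⟨0, by simp [altF_self], Reach.zero⟩
  have hlt : n < v := lt_of_le_of_ne h (Ne.symm hvn)
  by_cases hd2 : v - n ≤ 2
  · -- one subtraction reaches n directly
    have he : Edge n v n := by
      rcases (show n = v - 1 ∨ n = v - 2 by omega) with hn | hn
      · exact hn ▸ edge_sub1 n v (by omega)
      · exact hn ▸ edge_sub2 n v (by omega)
    exact ⟨1, by simpa using altF_pos n v hlt, Reach.step Reach.zero he⟩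
  -- d ≥ 3: the v-2 route, available in every case
  have hroute2 : altF n v = (v - n + 1) / 2 →
      ∃ K : Nat, (K : Int) ≤ altF n v ∧ Reach n v K n := by
    intro hv
    obtain ⟨K, hK, hr⟩ := reach_exists n (v - 2) (by omega)
    have hc := altF_le_c n (v - 2)
    refine ⟨K + 1, ?_, reach_cons n v (v - 2) (edge_sub2 n v (by omega)) hr⟩
    push_cast
    omega
  by_cases hb : v ≤ 0
  · exact hroute2 (by rw [altF_unfold, if_pos (Or.inr hb)])
  by_cases h2 : v % 2 = 0
  · by_cases hg : n ≤ v / 2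
    · have hv : altF n v = min ((v - n + 1) / 2) (1 + altF n (v / 2)) := by
        rw [altF_unfold, if_neg (by omega), if_pos h2, if_pos hg]
      rcases le_total ((v - n + 1) / 2) (1 + altF n (v / 2)) with hle | hle
      · exact hroute2 (by omega)
      · obtain ⟨K, hK, hr⟩ := reach_exists n (v / 2) hg
        refine ⟨K + 1, ?_, reach_cons n v (v / 2) (edge_half n v h2 hg) hr⟩
        push_cast
        omega
    · exact hroute2 (by rw [altF_unfold, if_neg (by omega), if_pos h2, if_neg hg])
  · by_cases hg : n ≤ (v - 1) / 2
    · have hv : altF n v = min ((v - n + 1) / 2) (2 + altF n ((v - 1) / 2)) := by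
        rw [altF_unfold, if_neg (by omega), if_neg h2, if_pos hg]
      rcases le_total ((v - n + 1) / 2) (2 + altF n ((v - 1) / 2)) with hle | hle
      · exact hroute2 (by omega)
      · obtain ⟨K, hK, hr⟩ := reach_exists n ((v - 1) / 2) hg
        have he1 : Edge n v (v - 1) := edge_sub1 n v (by omega)
        have he2 : Edge n (v - 1) ((v - 1) / 2) := by
          have := edge_half n (v - 1) (by omega) hg
          exact this
        refine ⟨K + 1 + 1, ?_, reach_cons n v (v - 1) he1 (reach_cons n (v - 1) _ he2 hr)⟩
        push_cast
        omega
    · exact hroute2 (by rw [altF_unfold, if_neg (by omega), if_neg h2, if_neg hg])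
termination_by (v - n).toNat
decreasing_by all_goals omega

theorem hash_contains_false_iff (h : Std.HashSet Int) (x : Int) :
    h.contains x = false ↔ x ∉ h := by
  simp

theorem mem_foldl_insert (l : List Int) (h0 : Std.HashSet Int) (v : Int) :
    v ∈ l.foldl (fun h x => h.insert x) h0 ↔ v ∈ h0 ∨ v ∈ l := by
  induction l generalizing h0 with
  | nil => simp
  | cons x l ih =>
    simp only [List.foldl_cons, ih, Std.HashSet.mem_insert, beq_iff_eq, List.mem_cons]
    constructor
    · rintro ((rfl | hv) | hv) <;> tauto
    · rintro (hv | rfl | hv) <;> tauto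

theorem mem_inner_fold (n : Int) (seen : Std.HashSet Int) (ns : List Int) (t : PySem.Set Int) (v : Int) :
    v ∈ ns.foldl (fun temp j =>
      if n ≤ j ∧ seen.contains j = false then PySem.Set.add temp j else temp) t ↔
    v ∈ t ∨ (v ∈ ns ∧ n ≤ v ∧ v ∉ seen) := by
  induction ns generalizing t with
  | nil => simp
  | cons j ns ih =>
    simp only [List.foldl_cons, ih, List.mem_cons]
    by_cases hc : n ≤ j ∧ seen.contains j = false
    · rw [if_pos hc]
      have hj := (hash_contains_false_iff seen j).mp hc.2
      have hj1 := hc.1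
      simp only [PySem.Set.mem_add]
      constructor
      · rintro (⟨hv | rfl⟩ | hv) <;> tauto
      · rintro (hv | ⟨rfl | hv, hn, hs⟩) <;> tauto
    · rw [if_neg hc]
      constructor
      · tauto
      · rintro (hv | ⟨rfl | hv, hn, hs⟩)
        · tauto
        · exact absurd ⟨hn, (hash_contains_false_iff seen v).mpr hs⟩ hc
        · tauto

theorem mem_searchStep (n : Int) (s : PySem.Set Int) (seen : Std.HashSet Int) (v : Int) :
    v ∈ searchStep n s seen ↔ ∃ i ∈ s, Edge n i v ∧ v ∉ seen := by
  rw [searchStep]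
  suffices h : ∀ (l : List Int) (acc : PySem.Set Int),
      v ∈ l.foldl (fun temp i =>
        (searchNums i).foldl (fun temp j =>
          if n ≤ j ∧ seen.contains j = false then PySem.Set.add temp j else temp) temp) acc ↔
      v ∈ acc ∨ ∃ i ∈ l, v ∈ searchNums i ∧ n ≤ v ∧ v ∉ seen by
    rw [h]
    simp only [PySem.Set.empty]
    constructor
    · rintro (hv | ⟨i, hi, hmem, hn, hs⟩)
      · simp at hv
      · exact ⟨i, hi, ⟨hn, hmem⟩, hs⟩
    · rintro ⟨i, hi, ⟨hn, hmem⟩, hs⟩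
      exact Or.inr ⟨i, hi, hmem, hn, hs⟩
  intro l
  induction l with
  | nil => simp
  | cons i l ih =>
    intro acc
    simp only [List.foldl_cons, ih, mem_inner_fold, List.mem_cons]
    constructor
    · rintro ((hv | ⟨hmem, hn, hs⟩) | ⟨i', hi', hmem, hn, hs⟩)
      · tauto
      · exact Or.inr ⟨i, Or.inl rfl, hmem, hn, hs⟩
      · exact Or.inr ⟨i', Or.inr hi', hmem, hn, hs⟩
    · rintro (hv | ⟨i', rfl | hi', hmem, hn, hs⟩)
      · tauto
      · exact Or.inl (Or.inr ⟨hmem, hn, hs⟩)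
      · exact Or.inr ⟨i', hi', hmem, hn, hs⟩

def IsLevel (n m : Int) (k : Nat) (v : Int) : Prop := Reach n m k v ∧ ∀ k' < k, ¬ Reach n m k' v
def InBall (n m : Int) (k : Nat) (v : Int) : Prop := ∃ k' ≤ k, Reach n m k' v

theorem reach_zero_iff (n m v : Int) : Reach n m 0 v ↔ v = m := by
  constructor
  · intro h
    cases h
    rfl
  · rintro rfl
    exact Reach.zero

theorem reach_succ_iff (n m : Int) (k : Nat) (v : Int) :
    Reach n m (k + 1) v ↔ ∃ i, Reach n m k i ∧ Edge n i v := by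
  constructor
  · intro h
    cases h with
    | step hr he => exact ⟨_, hr, he⟩
  · rintro ⟨i, hr, he⟩
    exact Reach.step hr he

theorem level_succ_iff (n m : Int) (k : Nat) (v : Int) :
    IsLevel n m (k + 1) v ↔ (∃ i, IsLevel n m k i ∧ Edge n i v) ∧ ¬ InBall n m k v := by
  constructor
  · rintro ⟨hr, hmin⟩
    obtain ⟨i, hri, he⟩ := (reach_succ_iff n m k v).mp hr
    refine ⟨⟨i, ⟨hri, ?_⟩, he⟩, ?_⟩
    · intro k' hk' hr'
      exact hmin (k' + 1) (by omega) (Reach.step hr' he)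
    · rintro ⟨k', hk', hr'⟩
      exact hmin k' (by omega) hr'
  · rintro ⟨⟨i, ⟨hri, _⟩, he⟩, hball⟩
    refine ⟨Reach.step hri he, ?_⟩
    intro k' hk' hr'
    exact hball ⟨k', by omega, hr'⟩

theorem ball_succ_iff (n m : Int) (k : Nat) (v : Int) :
    InBall n m (k + 1) v ↔ InBall n m k v ∨ IsLevel n m (k + 1) v := by
  constructor
  · rintro ⟨k', hk', hr⟩
    by_cases hb : InBall n m k v
    · exact Or.inl hb
    · rcases Nat.lt_or_ge k' (k + 1) with hlt | hge
      · exact absurd ⟨k', by omega, hr⟩ hb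
      · have hk'' : k' = k + 1 := by omega
        subst hk''
        refine Or.inr ⟨hr, ?_⟩
        intro j hj hrj
        exact hb ⟨j, by omega, hrj⟩
  · rintro (⟨k', hk', hr⟩ | ⟨hr, _⟩)
    · exact ⟨k', by omega, hr⟩
    · exact ⟨k + 1, le_refl _, hr⟩

theorem searchLoop_eq (n m : Int) (K₀ : Nat)
    (hK : Reach n m K₀ n) (hmin : ∀ k' < K₀, ¬ Reach n m k' n) :
    ∀ (fuel k : Nat) (s : PySem.Set Int) (seen : Std.HashSet Int),
      (∀ v, v ∈ s ↔ IsLevel n m k v) → (∀ v, v ∈ seen ↔ InBall n m k v) →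
      k ≤ K₀ → K₀ - k < fuel →
      searchLoop n fuel (k : Int) s seen = (K₀ : Int) := by
  intro fuel
  induction fuel with
  | zero => intro k s seen _ _ _ hf; omega
  | succ fuel ih =>
    intro k s seen hs hseen hk hf
    rw [searchLoop]
    by_cases hn : PySem.Set.contains s n = true
    · rw [if_pos hn]
      have hlev := (hs n).mp ((PySem.Set.contains_iff s n).mp hn)
      have h1 : ¬ k < K₀ := fun hlt => hmin k hlt hlev.1
      have h2 : K₀ = k := by omega
      rw [h2]
    · rw [if_neg hn]
      have hnin : n ∉ s := fun hmem => hn ((PySem.Set.contains_iff s n).mpr hmem)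
      have hklt : k < K₀ := by
        rcases Nat.lt_or_ge k K₀ with h | h
        · exact h
        · exfalso
          have hkK : k = K₀ := by omega
          subst hkK
          exact hnin ((hs n).mpr ⟨hK, hmin⟩)
      have hs' : ∀ v, v ∈ searchStep n s seen ↔ IsLevel n m (k + 1) v := by
        intro v
        rw [mem_searchStep, level_succ_iff]
        constructor
        · rintro ⟨i, hi, he, hsv⟩
          exact ⟨⟨i, (hs i).mp hi, he⟩, fun hb => hsv ((hseen v).mpr hb)⟩
        · rintro ⟨⟨i, hi, he⟩, hb⟩
          exact ⟨i, (hs i).mpr hi, he, fun hv => hb ((hseen v).mp hv)⟩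
      have hseen' : ∀ v, v ∈ (searchStep n s seen).foldl (fun h x => h.insert x) seen ↔ InBall n m (k + 1) v := by
        intro v
        rw [mem_foldl_insert, ball_succ_iff, hseen v, hs' v]
      have hcast : (k : Int) + 1 = ((k + 1 : Nat) : Int) := by push_cast; ring
      rw [hcast]
      exact ih (k + 1) _ _ hs' hseen' (by omega) (by omega)

theorem ofList_singleton (m : Int) : PySem.Set.ofList [m] = [m] := rfl

theorem search_eq_K (n m : Int) (hpre : n ≤ m) (K₀ : Nat)
    (hK : Reach n m K₀ n) (hmin : ∀ k' < K₀, ¬ Reach n m k' n) :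
    search n m = (K₀ : Int) := by
  have hs0 : ∀ v, v ∈ PySem.Set.ofList [m] ↔ IsLevel n m 0 v := by
    intro v
    rw [ofList_singleton]
    simp only [List.mem_singleton]
    constructor
    · rintro rfl
      exact ⟨Reach.zero, by omega⟩
    · rintro ⟨hr, _⟩
      exact (reach_zero_iff n m v).mp hr
  have hb0 : ∀ v, v ∈ (∅ : Std.HashSet Int).insert m ↔ InBall n m 0 v := by
    intro v
    rw [Std.HashSet.mem_insert]
    simp only [Std.HashSet.not_mem_empty, beq_iff_eq, or_false, eq_comm (a := m)]
    constructor
    · rintro rfl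
      exact ⟨0, le_refl _, Reach.zero⟩
    · rintro ⟨k', hk', hr⟩
      have : k' = 0 := by omega
      subst this
      exact (reach_zero_iff n m v).mp hr
  have hbound : K₀ ≤ (m - n).toNat := by
    by_contra hcon
    have hpath := reach_sub_ones n m (m - n).toNat (by omega)
    have heq : m - ((m - n).toNat : Int) = n := by omega
    rw [heq] at hpath
    exact hmin (m - n).toNat (by omega) hpath
  have := searchLoop_eq n m K₀ hK hmin ((m - n).toNat + 1) 0 _ _ hs0 hb0 (by omega) (by omega)
  simpa [search] using this

theorem search_eq_alt (n m : Int) (hpre : n ≤ m) : search n m = search_alt n m := by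
  obtain ⟨K, hKle, hKr⟩ := reach_exists n m hpre
  have hex : ∃ K : Nat, Reach n m K n := ⟨K, hKr⟩
  have hdec : DecidablePred (fun K => Reach n m K n) := fun _ => Classical.propDecidable _
  obtain ⟨K₀, hK, hmin⟩ : ∃ K₀ : Nat, Reach n m K₀ n ∧ ∀ k' < K₀, ¬ Reach n m k' n :=
    ⟨Nat.find hex, Nat.find_spec hex, fun k' hk' => Nat.find_min hex hk'⟩
  rw [search_eq_K n m hpre K₀ hK hmin]
  have h1 : altF n m ≤ (K₀ : Int) := by
    have := altF_le_reach n m hpre hK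
    rw [altF_self] at this
    omega
  have h2 : (K₀ : Int) ≤ altF n m := by
    have hle : K₀ ≤ K := Nat.le_of_not_lt fun hlt => hmin K hlt hKr
    have : (K₀ : Int) ≤ (K : Int) := by exact_mod_cast hle
    omega
  rw [search_alt]
  omega

-- ===== VERDICT (by name: the statement is the Claim_ definition above) =====
theorem search_spec : Claim_equal_search := by
  intro n m _ hpre
  unfold Spec_search
  exact search_eq_alt n m hpre
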